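-- pv_equiv track=rewrite | github.com/Egidi-A/Digital-Archaeology | Fase_2/cobol-to-java-migrator/src/analyzer/data_analyzer.py | _to_java_name
-- ===== SOURCE A (Python) =====
-- def _to_java_name(cobol_name: str) -> str:
--     """Converte un nome COBOL in nome Java (camelCase)"""
--     # Rimuove prefissi comuni COBOL
--     name = cobol_name
--     for prefix in ['WS-', 'LS-', 'W-']:
--         if name.startswith(prefix):
--             name = name[len(prefix):]
--
--     # Converte in camelCase
--     parts = name.replace('-', '_').split('_')
--     if len(parts) == 1:
--         return parts[0].lower()
--
--     return parts[0].lower() + ''.join(p.capitalize() for p in parts[1:])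
-- ===== SOURCE B (Python) =====
-- def _to_java_name(cobol_name: str) -> str:
--     """Converte un nome COBOL in nome Java (camelCase)"""
--     name = cobol_name
--     for prefix in ['WS-', 'LS-', 'W-']:
--         if name.startswith(prefix):
--             name = name[len(prefix):]
--
--     # Single left-to-right scan: a separator sets a flag, other chars are emitted
--     # uppercased after a separator and lowercased otherwise.
--     out = []
--     capitalize_next = False
--     for ch in name:
--         if ch == '-' or ch == '_':
--             capitalize_next = True
--         else:
--             out.append(ch.upper() if capitalize_next else ch.lower())
--             capitalize_next = False
--     return ''.join(out)
-- ===== Notes on version B (the rewrite author's own statement) =====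
-- stated objective: alternative
-- what changed: The replace/split/capitalize-join camelCase phase of A is replaced by a single left-to-right character scan maintaining a capitalize_next flag, building no intermediate part lists.
import Mathlib
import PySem

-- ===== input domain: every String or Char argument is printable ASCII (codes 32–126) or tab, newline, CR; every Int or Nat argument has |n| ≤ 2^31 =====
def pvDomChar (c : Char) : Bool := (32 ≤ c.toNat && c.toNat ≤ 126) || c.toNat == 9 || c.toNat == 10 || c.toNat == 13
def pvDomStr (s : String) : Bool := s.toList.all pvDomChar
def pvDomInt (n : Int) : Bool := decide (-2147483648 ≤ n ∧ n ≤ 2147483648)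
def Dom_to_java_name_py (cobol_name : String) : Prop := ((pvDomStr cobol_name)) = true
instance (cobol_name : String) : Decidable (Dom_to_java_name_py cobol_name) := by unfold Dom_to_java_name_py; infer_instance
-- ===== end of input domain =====

-- B replaces A's replace/split/capitalize-join camelCase phase by a single character
-- scan with a capitalize_next flag; proved equal to A on all inputs (objective: alternative).

-- ===== PORT A =====
-- str.capitalize: first char uppercased, rest lowercased (exact on ASCII, where
-- Python's titlecase of a single char coincides with upper).
def pyCapitalize (cs : List Char) : List Char :=
  match cs with
  | [] => []
  | c :: rest => PySem.Chars.upperChar c :: PySem.Chars.lower rest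

def to_java_name_py (cobol_name : String) : String :=
  -- for prefix in ['WS-', 'LS-', 'W-']: if name.startswith(prefix): name = name[len(prefix):]
  let name := ["WS-", "LS-", "W-"].foldl
    (fun n p => if PySem.Str.startswith n p then PySem.Str.slice n (some (PySem.Str.len p)) none else n)
    cobol_name
  -- parts = name.replace('-', '_').split('_')
  let parts := PySem.Chars.splitOn (PySem.Chars.replace name.toList ['-'] ['_']) ['_']
  match parts with
  | [] => ""  -- unreachable: splitOn never returns []
  | p0 :: rest =>
    if parts.length = 1 then String.ofList (PySem.Chars.lower p0)
    else String.ofList (PySem.Chars.lower p0 ++ PySem.Chars.join [] (rest.map pyCapitalize))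

-- ===== PORT B =====
def to_java_name_py_alt (cobol_name : String) : String :=
  let name := ["WS-", "LS-", "W-"].foldl
    (fun n p => if PySem.Str.startswith n p then PySem.Str.slice n (some (PySem.Str.len p)) none else n)
    cobol_name
  let r := name.toList.foldl
    (fun (st : List Char × Bool) ch =>
      if ch = '-' ∨ ch = '_' then (st.1, true)
      else (st.1 ++ [if st.2 then PySem.Chars.upperChar ch else PySem.Chars.lowerChar ch], false))
    ([], false)
  String.ofList r.1

-- ===== PRECONDITION & SPEC =====
def Spec_to_java_name_py (cobol_name : String) (out : String) : Prop := out = to_java_name_py_alt cobol_name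
instance (cobol_name : String) (out : String) : Decidable (Spec_to_java_name_py cobol_name out) := by unfold Spec_to_java_name_py; infer_instance

-- ===== CLAIM (what is proved, stated in full; the proofs are below) =====
def Claim_equal_to_java_name_py : Prop := ∀ (cobol_name : String), Dom_to_java_name_py cobol_name → Spec_to_java_name_py cobol_name (to_java_name_py cobol_name)

-- ===== LEMMAS AND PROOFS =====

-- '-' ↦ '_', other chars unchanged
def replChar (c : Char) : Char := if c = '-' then '_' else c

-- split on '_' as (first segment, remaining segments)
def splitCharP (cs : List Char) : List Char × List (List Char) :=
  match cs with
  | [] => ([], [])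
  | c :: cs' =>
    if c = '_' then ([], (splitCharP cs').1 :: (splitCharP cs').2)
    else (c :: (splitCharP cs').1, (splitCharP cs').2)

-- B's scan as a structural recursion (cap = capitalize_next)
def scanCamel (cap : Bool) (cs : List Char) : List Char :=
  match cs with
  | [] => []
  | c :: cs' =>
    if c = '-' ∨ c = '_' then scanCamel true cs'
    else (if cap then PySem.Chars.upperChar c else PySem.Chars.lowerChar c) :: scanCamel false cs'

theorem replace_go_char (fuel : Nat) : ∀ (cs acc : List Char), cs.length ≤ fuel →
    PySem.Chars.replace.go ['-'] ['_'] fuel cs acc = acc.reverse ++ cs.map replChar := by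
  induction fuel with
  | zero =>
    intro cs acc h
    have hcs : cs = [] := by cases cs <;> simp_all
    subst hcs
    simp [PySem.Chars.replace.go]
  | succ n ih =>
    intro cs acc h
    cases cs with
    | nil => simp [PySem.Chars.replace.go]
    | cons c t =>
      rw [PySem.Chars.replace.go]
      by_cases hc : c = '-'
      · subst hc
        simp only [List.isPrefixOf, BEq.rfl, Bool.true_and, if_pos]
        rw [show List.drop ['-'].length ('-' :: t) = t from rfl]
        rw [ih t _ (by simpa using h)]
        simp [replChar]
      · have : (['-'].isPrefixOf (c :: t)) = false := by
          simp [List.isPrefixOf, Ne.symm hc]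
        rw [this]
        simp only [Bool.false_eq_true, if_false]
        rw [ih t _ (by simpa using h)]
        simp [replChar, hc]

theorem replace_char (cs : List Char) :
    PySem.Chars.replace cs ['-'] ['_'] = cs.map replChar := by
  have := replace_go_char cs.length cs [] (le_refl _)
  simpa [PySem.Chars.replace] using this

theorem splitOn_go_char (fuel : Nat) : ∀ (l cur : List Char) (acc : List (List Char)), l.length ≤ fuel →
    PySem.Chars.splitOn.go ['_'] fuel l cur acc
      = acc.reverse ++ (cur.reverse ++ (splitCharP l).1) :: (splitCharP l).2 := by
  induction fuel with
  | zero =>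
    intro l cur acc h
    have hl : l = [] := by cases l <;> simp_all
    subst hl
    simp [PySem.Chars.splitOn.go, splitCharP]
  | succ n ih =>
    intro l cur acc h
    cases l with
    | nil => simp [PySem.Chars.splitOn.go, splitCharP]
    | cons c t =>
      rw [PySem.Chars.splitOn.go]
      by_cases hc : c = '_'
      · subst hc
        simp only [List.isPrefixOf, BEq.rfl, Bool.true_and, if_pos]
        rw [show List.drop ['_'].length ('_' :: t) = t from rfl]
        rw [ih t [] _ (by simpa using h)]
        simp [splitCharP]
      · have : (['_'].isPrefixOf (c :: t)) = false := by
          simp [List.isPrefixOf, Ne.symm hc]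
        rw [this]
        simp only [Bool.false_eq_true, if_false]
        rw [ih t (c :: cur) acc (by simpa using h)]
        simp [splitCharP, hc]

theorem splitOn_char (cs : List Char) :
    PySem.Chars.splitOn cs ['_'] = (splitCharP cs).1 :: (splitCharP cs).2 := by
  have := splitOn_go_char (cs.length + 1) cs [] [] (by omega)
  simpa [PySem.Chars.splitOn] using this

theorem flatten_intersperse_nil (ps : List (List Char)) :
    (List.intersperse ([] : List Char) ps).flatten = ps.flatten := by
  induction ps with
  | nil => simp
  | cons p t ih =>
    cases t with
    | nil => simp
    | cons q u =>
      rw [show List.intersperse ([] : List Char) (p :: q :: u)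
            = p :: [] :: List.intersperse ([] : List Char) (q :: u) from rfl]
      simp only [List.flatten_cons] at *
      simp [ih]

theorem join_nil_eq_flatten (ps : List (List Char)) :
    PySem.Chars.join [] ps = ps.flatten := by
  simp [PySem.Chars.join, List.intercalate, flatten_intersperse_nil]

theorem scan_main (cs : List Char) :
    (PySem.Chars.lower (splitCharP (cs.map replChar)).1
        ++ ((splitCharP (cs.map replChar)).2.map pyCapitalize).flatten = scanCamel false cs)
    ∧ (pyCapitalize (splitCharP (cs.map replChar)).1
        ++ ((splitCharP (cs.map replChar)).2.map pyCapitalize).flatten = scanCamel true cs) := by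
  induction cs with
  | nil => constructor <;> simp [splitCharP, scanCamel, pyCapitalize, PySem.Chars.lower]
  | cons c t ih =>
    obtain ⟨ih1, ih2⟩ := ih
    by_cases hc : c = '-' ∨ c = '_'
    · have hr : replChar c = '_' := by rcases hc with h | h <;> simp [replChar, h]
      have hs : splitCharP (List.map replChar (c :: t))
          = ([], (splitCharP (List.map replChar t)).1 :: (splitCharP (List.map replChar t)).2) := by
        simp [hr, splitCharP]
      constructor
      · rw [hs]
        simp only [List.map_cons, List.flatten_cons, scanCamel, if_pos hc,
          PySem.Chars.lower, List.map_nil, List.nil_append]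
        simpa [PySem.Chars.lower] using ih2
      · rw [hs]
        simp only [List.map_cons, List.flatten_cons, scanCamel, if_pos hc,
          pyCapitalize, List.nil_append]
        exact ih2
    · have hc1 : c ≠ '-' := fun h => hc (Or.inl h)
      have hc2 : c ≠ '_' := fun h => hc (Or.inr h)
      have hr : replChar c = c := by simp [replChar, hc1]
      have hs : splitCharP (List.map replChar (c :: t))
          = (c :: (splitCharP (List.map replChar t)).1, (splitCharP (List.map replChar t)).2) := by
        simp [hr, splitCharP, hc2]
      constructor
      · rw [hs]
        simp only [scanCamel, if_neg hc, if_neg (by simp : ¬ (false = true))]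
        rw [show PySem.Chars.lower (c :: (splitCharP (List.map replChar t)).1)
              = PySem.Chars.lowerChar c :: PySem.Chars.lower (splitCharP (List.map replChar t)).1
            from by simp [PySem.Chars.lower]]
        rw [List.cons_append, ih1]
      · rw [hs]
        simp only [scanCamel, if_neg hc, pyCapitalize]
        rw [List.cons_append, ih1]
        simp

theorem foldl_scan (cs : List Char) : ∀ (acc : List Char) (cap : Bool),
    (cs.foldl
      (fun (st : List Char × Bool) ch =>
        if ch = '-' ∨ ch = '_' then (st.1, true)
        else (st.1 ++ [if st.2 then PySem.Chars.upperChar ch else PySem.Chars.lowerChar ch], false))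
      (acc, cap)).1 = acc ++ scanCamel cap cs := by
  induction cs with
  | nil => intro acc cap; simp [scanCamel]
  | cons c t ih =>
    intro acc cap
    by_cases hc : c = '-' ∨ c = '_'
    · simp only [List.foldl_cons, if_pos hc, scanCamel]
      exact ih acc true
    · simp only [List.foldl_cons, if_neg hc, scanCamel]
      rw [ih]
      cases cap <;> simp

-- ===== VERDICT (by name: the statement is the Claim_ definition above) =====
theorem to_java_name_py_spec : Claim_equal_to_java_name_py := by
  intro s _
  unfold Spec_to_java_name_py to_java_name_py to_java_name_py_alt
  dsimp only
  generalize (["WS-", "LS-", "W-"].foldl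
    (fun n p => if PySem.Str.startswith n p then PySem.Str.slice n (some (PySem.Str.len p)) none else n)
    s) = m
  rw [replace_char, splitOn_char, foldl_scan]
  simp only [List.nil_append]
  rcases h2 : (splitCharP (m.toList.map replChar)).2 with _ | ⟨q, qs⟩
  · have hm := (scan_main m.toList).1
    rw [h2] at hm
    simp only [List.map_nil, List.flatten_nil, List.append_nil] at hm
    simp [hm]
  · have hm := (scan_main m.toList).1
    rw [h2] at hm
    rw [
      if_neg (show ¬ (((splitCharP (List.map replChar m.toList)).1 :: q :: qs).length = 1) by simp),
      join_nil_eq_flatten]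
    exact congrArg String.ofList hm
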